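-- pv_equiv track=rewrite | github.com/SergPort/Data-Portfolio | Ribosome Project/rib_project.py | ORFcounter
-- ===== SOURCE A (Python) =====
-- def oframe(amino):
--     oframes = []
--     for i in range(0,len(amino)):
--         if amino[i]=='Met' or amino[i]=='MET':
--             temp = ''.join(amino[i::])
--             oframe = temp[0:temp.find('***') + 3]
--             oframes.append(oframe)
--     return oframes
--
-- def ORFcounter(frame):
--     ORFcounter = 0
--     frame1 = oframe(frame)
--     for x in frame1:
--         if x == '':
--             break
--         else:
--             for i in x:
--                 if i == 'M':
--                     if x.count(i) < 2:
--                         if '*' in x: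
--                             ORFcounter += 1
--     return ORFcounter, frame1
-- ===== SOURCE B (Python) =====
-- def ORFcounter(frame):
--     # Join the frame once, precompute all stop-codon positions, and read each
--     # Met's ORF off the joined sequence with a two-pointer sweep; a Met with no
--     # downstream stop codon opens no ORF and is skipped.
--     seq = ''.join(frame)
--     stops = [q for q in range(len(seq) - 2) if seq[q:q + 3] == '***']
--     total = 0
--     orfs = []
--     p = 0
--     j = 0
--     for token in frame:
--         if token in ('Met', 'MET'):
--             while j < len(stops) and stops[j] < p:
--                 j += 1
--             if j < len(stops):
--                 orf = seq[p:stops[j] + 3]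
--                 if orf.count('M') == 1:
--                     total += 1
--                 orfs.append(orf)
--         p += len(token)
--     return total, orfs
-- ===== Notes on version B (the rewrite author's own statement) =====
-- stated objective: alternative
-- what changed: B joins the frame once and precomputes all stop-codon ('***') positions, then reads each Met's ORF off the joined sequence with a two-pointer sweep over that sorted list, instead of A's re-joining the whole suffix and rescanning it for every Met; a Met with no downstream stop opens no ORF in B.
-- intended difference: On frames containing a 'Met'/'MET' element with no '***' downstream in the joined sequence, A appends an accidental two-character slice 'Me'/'ME' to the returned ORF list (str.find returning -1 plus 3), while B records no ORF for such a stop-less Met; an ORF ends at a stop codon, so B's list is the intended one, and the count is identical either way. — e.g. on ORFcounter(["Met"]): A returns (0, ["Me"]), B returns (0, [])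
import Mathlib
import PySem

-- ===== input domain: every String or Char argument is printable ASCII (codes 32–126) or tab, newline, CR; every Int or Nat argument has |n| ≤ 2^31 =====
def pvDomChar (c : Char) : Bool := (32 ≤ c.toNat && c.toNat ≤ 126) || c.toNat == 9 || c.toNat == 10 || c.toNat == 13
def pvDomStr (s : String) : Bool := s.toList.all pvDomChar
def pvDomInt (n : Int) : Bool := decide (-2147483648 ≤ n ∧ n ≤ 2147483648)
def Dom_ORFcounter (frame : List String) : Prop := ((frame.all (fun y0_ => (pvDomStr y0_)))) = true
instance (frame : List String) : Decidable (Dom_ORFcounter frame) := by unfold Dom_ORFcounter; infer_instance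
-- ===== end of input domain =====

-- B joins the frame once, precomputes the stop-codon positions and consumes them with a
-- two-pointer sweep instead of A's re-join of the whole suffix at every Met; on Mets with no
-- downstream stop codon B records no ORF where A records an accidental two-character slice
-- (stated in D_ below).

-- ===== PORT A =====
-- helper oframe: for each 'Met'/'MET' element, join the suffix and cut at the first '***' (inclusive)
def pvOframe (amino : List String) : List String :=
  (PySem.List.pyRange 0 (amino.length : Int)).foldl (fun oframes i =>
    match PySem.List.pyGet? amino i with
    | none => oframes
    | some a =>
      if a = "Met" ∨ a = "MET" then
        let temp := PySem.Chars.join [] ((PySem.List.slice amino (some i) none).map String.toList)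
        let orf := PySem.Chars.slice temp (some 0) (some (PySem.Chars.find temp ['*','*','*'] + 3))
        oframes ++ [String.ofList orf]
      else oframes) []

-- the inner 'for i in x' loop of A
def pvInner (x : List Char) : Int :=
  x.foldl (fun acc i =>
    if i = 'M' then
      if (PySem.Chars.count x [i] : Int) < 2 then
        if PySem.Chars.isIn ['*'] x then acc + 1 else acc
      else acc
    else acc) 0

-- the outer 'for x in frame1' loop of A (with its break on '')
def pvOuter : List String → Int → Int
  | [], c => c
  | x :: rest, c => if x = "" then c else pvOuter rest (c + pvInner x.toList)

def ORFcounter (frame : List String) : Int × List String :=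
  let frame1 := pvOframe frame
  (pvOuter frame1 0, frame1)

-- ===== PORT B =====
-- the 'while j < len(stops) and stops[j] < p: j += 1' loop of B
def pvAdvance (stops : List Int) (p : Int) (j : Nat) : Nat :=
  if h : j < stops.length then
    if stops[j] < p then pvAdvance stops p (j + 1) else j
  else j
termination_by stops.length - j

-- the body of B's 'for token in frame' loop; state = (total, orfs, p, j)
def pvBStep (S : List Char) (stops : List Int) (st : Int × List String × Int × Nat)
    (a : String) : Int × List String × Int × Nat :=
  let total := st.1
  let orfs := st.2.1
  let p := st.2.2.1
  let j := st.2.2.2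
  let t3 : Int × List String × Nat :=
    if a = "Met" ∨ a = "MET" then
      let j := pvAdvance stops p j
      if h : j < stops.length then
        let x := PySem.List.slice S (some p) (some (stops[j] + 3))
        ((if PySem.Chars.count x ['M'] = 1 then total + 1 else total), orfs ++ [String.ofList x], j)
      else (total, orfs, j)
    else (total, orfs, j)
  (t3.1, t3.2.1, p + (PySem.Str.len a : Int), t3.2.2)

def ORFcounter_alt (frame : List String) : Int × List String :=
  let S := PySem.Chars.join [] (frame.map String.toList)
  let n : Int := (S.length : Int)
  let stops := (PySem.List.pyRange 0 (n - 2)).filter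
      (fun q => PySem.List.slice S (some q) (some (q + 3)) = ['*','*','*'])
  let res := frame.foldl (pvBStep S stops) ((0 : Int), ([] : List String), (0 : Int), (0 : Nat))
  (res.1, res.2.1)

-- ===== PRECONDITION & SPEC =====
-- On frames with a 'Met'/'MET' element that has no '***' downstream in the joined sequence,
-- A appends the accidental two-character slice 'Me'/'ME' (str.find returning -1 plus 3) to the
-- ORF list, while B records no ORF for such a stop-less Met (the count is the same either way);
-- an ORF ends at a stop codon, so B's list is the intended one.
def D_ORFcounter (frame : List String) : Prop :=
  ((List.range frame.length).any (fun i =>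
    (frame.getD i "" = "Met" || frame.getD i "" = "MET")
    && !(PySem.Chars.isIn ['*','*','*'] (((frame.drop i).map String.toList).flatten)))) = true
instance (frame : List String) : Decidable (D_ORFcounter frame) := by unfold D_ORFcounter; infer_instance

def Spec_ORFcounter (frame : List String) (out : Int × List String) : Prop := ¬ D_ORFcounter frame → out = ORFcounter_alt frame
instance (frame : List String) (out : Int × List String) : Decidable (Spec_ORFcounter frame out) := by unfold Spec_ORFcounter; infer_instance

def pvDiffWitness_ORFcounter : List String := ["Met"]
def pvDiffWitnessOut_ORFcounter : (Int × List String) × (Int × List String) := ((0, ["Me"]), (0, []))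

-- ===== CLAIM (what is proved, stated in full; the proofs are below) =====
def Claim_unchanged_ORFcounter : Prop := ∀ (frame : List String), Dom_ORFcounter frame → Spec_ORFcounter frame (ORFcounter frame)
def Claim_changed_ORFcounter : Prop := Dom_ORFcounter (pvDiffWitness_ORFcounter) ∧ D_ORFcounter (pvDiffWitness_ORFcounter) ∧ ORFcounter (pvDiffWitness_ORFcounter) = pvDiffWitnessOut_ORFcounter.1 ∧ ORFcounter_alt (pvDiffWitness_ORFcounter) = pvDiffWitnessOut_ORFcounter.2 ∧ pvDiffWitnessOut_ORFcounter.1 ≠ pvDiffWitnessOut_ORFcounter.2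
def Claim_exact_ORFcounter : Prop := ∀ (frame : List String), Dom_ORFcounter frame → D_ORFcounter frame → ORFcounter frame ≠ ORFcounter_alt frame

-- ===== LEMMAS AND PROOFS =====

theorem pv_join_eq_flatten (l : List (List Char)) : PySem.Chars.join [] l = l.flatten := by
  induction l with
  | nil => simp [PySem.Chars.join_nil]
  | cons a t ih =>
    cases t with
    | nil => simp [PySem.Chars.join, List.intercalate]
    | cons b r =>
      rw [PySem.Chars.join_cons_cons]
      simp [ih]

theorem pv_count_go (c : Char) : ∀ (fuel : Nat) (l : List Char) (acc : Nat), l.length ≤ fuel →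
    PySem.Chars.count.go [c] fuel l acc = acc + l.count c := by
  intro fuel
  induction fuel with
  | zero => intro l acc h; cases l with
    | nil => simp [PySem.Chars.count.go]
    | cons a t => simp at h
  | succ n ih =>
    intro l acc h
    cases l with
    | nil => simp [PySem.Chars.count.go]
    | cons a t =>
      simp only [PySem.Chars.count.go]
      by_cases hc : a = c
      · simp [hc, List.isPrefixOf, ih t (acc+1) (by simpa using h), List.count_cons]
        omega
      · simp [List.isPrefixOf, hc, Ne.symm hc, ih t acc (by simpa using h), List.count_cons]

theorem pv_count_single (s : List Char) (c : Char) : PySem.Chars.count s [c] = s.count c := by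
  simp [PySem.Chars.count, PySem.Chars.count.go, pv_count_go c s.length s 0 le_rfl]

theorem pv_inner_eq (x : List Char) :
    pvInner x = if (x.count 'M' = 1 ∧ PySem.Chars.isIn ['*'] x) then 1 else 0 := by
  unfold pvInner
  by_cases hst : PySem.Chars.isIn ['*'] x
  · by_cases hlt : x.count 'M' < 2
    · have hbody : ∀ (acc : Int), ∀ i ∈ x, (if i = 'M' then
          if (PySem.Chars.count x [i] : Int) < 2 then
            if PySem.Chars.isIn ['*'] x then acc + 1 else acc
          else acc
        else acc) = (if (i == 'M') = true then acc + 1 else acc) := by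
        intro acc i _
        by_cases hi : i = 'M'
        · simp [hi, hst, pv_count_single]; omega
        · simp [hi]
      rw [PySem.List.foldl_congr_mem x _ _ 0 hbody, PySem.List.foldl_count_if]
      have : x.countP (fun i => i == 'M') = x.count 'M' := rfl
      rw [this]
      by_cases h1 : x.count 'M' = 1
      · simp [h1, hst]
      · have h0 : x.count 'M' = 0 := by omega
        simp [h0, h1]
    · have hbody : ∀ (acc : Int), ∀ i ∈ x, (if i = 'M' then
          if (PySem.Chars.count x [i] : Int) < 2 then
            if PySem.Chars.isIn ['*'] x then acc + 1 else acc
          else acc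
        else acc) = acc := by
        intro acc i _
        by_cases hi : i = 'M'
        · simp [hi, pv_count_single]; omega
        · simp [hi]
      rw [PySem.List.foldl_congr_mem x _ _ 0 hbody]
      have h1 : x.count 'M' ≠ 1 := by omega
      simp [List.foldl_fixed, h1]
  · have hbody : ∀ (acc : Int), ∀ i ∈ x, (if i = 'M' then
        if (PySem.Chars.count x [i] : Int) < 2 then
          if PySem.Chars.isIn ['*'] x then acc + 1 else acc
        else acc
      else acc) = acc := by
      intro acc i _
      by_cases hi : i = 'M' <;> simp [hi, hst]
    rw [PySem.List.foldl_congr_mem x _ _ 0 hbody]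
    simp [List.foldl_fixed, hst]

theorem pv_outer_eq (l : List String) (c : Int) (h : ∀ x ∈ l, x ≠ "") :
    pvOuter l c = c + (l.map (fun x => pvInner x.toList)).sum := by
  induction l generalizing c with
  | nil => simp [pvOuter]
  | cons x rest ih =>
    have hx : x ≠ "" := h x (by simp)
    simp only [pvOuter, if_neg hx, List.map_cons, List.sum_cons]
    rw [ih _ (fun y hy => h y (by simp [hy]))]
    ring

def pvP (amino : List String) (k : Nat) : Bool :=
  amino.getD k "" = "Met" || amino.getD k "" = "MET"

def pvG (amino : List String) (k : Nat) : String :=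
  let t := ((amino.drop k).map String.toList).flatten
  String.ofList (t.take ((PySem.Chars.find t ['*','*','*'] + 3).toNat))

theorem pv_slice0 (t : List Char) (e : Int) (he : 0 ≤ e) :
    PySem.Chars.slice t (some 0) (some e) = t.take e.toNat := by
  have h0 : (0 : Int) = ((0 : Nat) : Int) := rfl
  have he' : e = ((e.toNat : Nat) : Int) := by omega
  rw [PySem.Chars.slice_eq_listSlice, h0, he', PySem.List.slice_natCast]
  simp
  omega


theorem pvOframe_closed (amino : List String) :
    pvOframe amino = ((List.range amino.length).filter (pvP amino)).map (pvG amino) := by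
  unfold pvOframe
  rw [PySem.List.pyRange_zero_natCast, List.foldl_map]
  have hbody : ∀ (acc : List String), ∀ k ∈ List.range amino.length,
      (fun oframes i =>
        match PySem.List.pyGet? amino i with
        | none => oframes
        | some a =>
          if a = "Met" ∨ a = "MET" then
            let temp := PySem.Chars.join [] ((PySem.List.slice amino (some i) none).map String.toList)
            let orf := PySem.Chars.slice temp (some 0) (some (PySem.Chars.find temp ['*','*','*'] + 3))
            oframes ++ [String.ofList orf]
          else oframes) acc ((k : Nat) : Int)
      = (if pvP amino k then acc ++ [pvG amino k] else acc) := by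
    intro acc k hk
    rw [List.mem_range] at hk
    have hget : PySem.List.pyGet? amino ((k : Nat) : Int) = some (amino.getD k "") := by
      rw [PySem.List.pyGet?_natCast, List.getElem?_eq_getElem hk]
      simp [List.getD, List.getElem?_eq_getElem hk]
    beta_reduce
    rw [hget]
    have hsl : PySem.List.slice amino (some ((k : Nat) : Int)) none = amino.drop k := by
      rw [PySem.List.slice_from amino (by positivity)]
      simp
    simp only [hsl, pv_join_eq_flatten]
    by_cases hc : amino.getD k "" = "Met" ∨ amino.getD k "" = "MET"
    · rw [if_pos hc, if_pos (by unfold pvP; simp only [List.getD] at *; rcases hc with h | h <;> simp [h])]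
      have hfind := PySem.Chars.neg_one_le_find (((amino.drop k).map String.toList).flatten) ['*','*','*']
      rw [pv_slice0 _ _ (by omega)]
      rfl
    · rw [if_neg hc, if_neg (by unfold pvP; simp only [List.getD] at *; push_neg at hc; simp [hc.1, hc.2])]
  rw [PySem.List.foldl_congr_mem _ _ _ [] hbody, PySem.List.foldl_append_if]
  simp

-- single-scan reference for A: at each Met append the cut (take 2 when no stop), count 1-Met stop-ended ORFs
def pvRefAux (S : List Char) : List String → Nat → Int × List String
  | [], _ => (0, [])
  | a :: rest, p =>
    let r := pvRefAux S rest (p + a.toList.length)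
    if a = "Met" ∨ a = "MET" then
      let d := PySem.Chars.find (S.drop p) ['*','*','*']
      let x := (S.drop p).take (d + 3).toNat
      ((if (x.count 'M' = 1 ∧ 0 ≤ d) then 1 else 0) + r.1, String.ofList x :: r.2)
    else r

-- single-scan reference for B: Mets with no downstream stop contribute nothing
def pvRefAuxB (S : List Char) : List String → Nat → Int × List String
  | [], _ => (0, [])
  | a :: rest, p =>
    let r := pvRefAuxB S rest (p + a.toList.length)
    if a = "Met" ∨ a = "MET" then
      let d := PySem.Chars.find (S.drop p) ['*','*','*']
      if 0 ≤ d then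
        let x := (S.drop p).take (d + 3).toNat
        ((if x.count 'M' = 1 then 1 else 0) + r.1, String.ofList x :: r.2)
      else r
    else r

theorem pv_refA (rest : List String) (p : Nat) (S : List Char)
    (h : S.drop p = (rest.map String.toList).flatten) :
    ((List.range rest.length).filter (pvP rest)).map (pvG rest) = (pvRefAux S rest p).2
    ∧ (pvRefAux S rest p).1 = ((pvRefAux S rest p).2.map (fun y => pvInner y.toList)).sum
    ∧ ∀ y ∈ (pvRefAux S rest p).2, y ≠ "" := by
  induction rest generalizing p with
  | nil => simp [pvRefAux]
  | cons a rest ih =>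
    have h' : S.drop (p + a.toList.length) = (rest.map String.toList).flatten := by
      rw [← List.drop_drop, h]
      simp
    obtain ⟨ih1, ih2, ih3⟩ := ih (p + a.toList.length) h'
    have hdropS : S.drop p = a.toList ++ (rest.map String.toList).flatten := by
      rw [h]; simp
    have hPs : ∀ k, pvP (a :: rest) (k + 1) = pvP rest k := fun k => rfl
    have hGs : ∀ k, pvG (a :: rest) (k + 1) = pvG rest k := by
      intro k; simp [pvG]
    have hfilter : (List.map Nat.succ (List.range rest.length)).filter (pvP (a :: rest))
        = List.map Nat.succ ((List.range rest.length).filter (pvP rest)) := by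
      rw [List.filter_map]
      exact congrArg _ (List.filter_congr (fun k _ => hPs k))
    have hmap : List.map (pvG (a :: rest)) (List.map Nat.succ ((List.range rest.length).filter (pvP rest)))
        = List.map (pvG rest) ((List.range rest.length).filter (pvP rest)) := by
      rw [List.map_map]
      exact List.map_congr_left (fun k _ => hGs k)
    have hshift : ((List.range (a :: rest).length).filter (pvP (a :: rest))).map (pvG (a :: rest))
        = (if a = "Met" ∨ a = "MET" then [pvG (a :: rest) 0] else [])
          ++ ((List.range rest.length).filter (pvP rest)).map (pvG rest) := by
      rw [List.length_cons, List.range_succ_eq_map, List.filter_cons, hfilter]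
      by_cases hc : a = "Met" ∨ a = "MET"
      · have h0b : pvP (a :: rest) 0 = true := by
          unfold pvP
          simp only [List.getD, List.getElem?_cons_zero, Option.getD_some]
          rcases hc with hm | hm <;> simp [hm]
        simp [h0b, hc, hmap]
      · have h0b : pvP (a :: rest) 0 = false := by
          unfold pvP
          simp only [List.getD, List.getElem?_cons_zero, Option.getD_some]
          push_neg at hc
          simp [hc.1, hc.2]
        simp [h0b, hc, hmap]
    by_cases hc : a = "Met" ∨ a = "MET"
    · have hd := PySem.Chars.neg_one_le_find (S.drop p) ['*','*','*']
      set d := PySem.Chars.find (S.drop p) ['*','*','*'] with hdef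
      set x := (S.drop p).take (d + 3).toNat with hxdef
      have hRef : pvRefAux S (a :: rest) p =
          ((if (x.count 'M' = 1 ∧ 0 ≤ d) then 1 else 0) + (pvRefAux S rest (p + a.toList.length)).1,
            String.ofList x :: (pvRefAux S rest (p + a.toList.length)).2) := by
        simp only [pvRefAux, if_pos hc]
        rfl
      have hG0 : pvG (a :: rest) 0 = String.ofList x := by
        simp only [pvG, List.drop_zero]
        rw [← h]
      have haM : a.toList = ['M','e','t'] ∨ a.toList = ['M','E','T'] := by
        rcases hc with hMet | hMet <;> simp [hMet]
      have hstar : PySem.Chars.isIn ['*'] x = true ↔ 0 ≤ d := by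
        constructor
        · intro hin
          by_contra hneg
          have hdm1 : d = -1 := by omega
          have hx2 : x = a.toList.take 2 := by
            rw [hxdef, hdm1, show ((-1 : Int) + 3).toNat = 2 from rfl, hdropS,
              List.take_append_of_le_length (by rcases haM with hm | hm <;> simp [hm])]
          rcases haM with hm | hm <;> (rw [hx2, hm] at hin; exact absurd hin (by decide))
        · intro hdn
          have hspec := PySem.Chars.find_spec (s := S.drop p) (sub := ['*','*','*']) hdn
          have hpre : ['*','*','*'] <+: (S.drop p).drop d.toNat := hspec.1
          have hx3 : x = (S.drop p).take d.toNat ++ ['*','*','*'] := by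
            have h3 : ['*','*','*'] = List.take 3 ((S.drop p).drop d.toNat) :=
              List.prefix_iff_eq_take.mp hpre
            rw [hxdef, show (d + 3).toNat = d.toNat + 3 by omega, List.take_add, ← h3]
          rw [PySem.Chars.isIn_iff_infix, hx3]
          exact ⟨(S.drop p).take d.toNat, ['*','*'], by simp⟩
      refine ⟨?_, ?_, ?_⟩
      · rw [hshift, if_pos hc, hRef, hG0, ih1]
        simp
      · rw [hRef]
        simp only [List.map_cons, List.sum_cons]
        rw [← ih2]
        have hpi : pvInner (String.ofList x).toList = if (x.count 'M' = 1 ∧ 0 ≤ d) then 1 else 0 := by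
          rw [String.toList_ofList, pv_inner_eq]
          by_cases h1 : x.count 'M' = 1
          · by_cases h2 : 0 ≤ d
            · simp [h1, h2, hstar.mpr h2]
            · have hni : PySem.Chars.isIn ['*'] x ≠ true := fun hh => h2 (hstar.mp hh)
              simp [h1, h2, hni]
          · simp [h1]
        rw [hpi]
      · rw [hRef]
        intro y hy
        rcases List.mem_cons.mp hy with hy | hy
        · subst hy
          intro hemp
          have hxe : x = [] := by
            have := congrArg String.toList hemp
            rwa [String.toList_ofList] at this
          have hxne : x ≠ [] := by
            rw [hxdef, hdropS]
            rcases haM with hm | hm <;>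
              (rw [hm]; intro hfalse; simp at hfalse; omega)
          exact hxne hxe
        · exact ih3 y hy
    · have hRef : pvRefAux S (a :: rest) p = pvRefAux S rest (p + a.toList.length) := by
        simp only [pvRefAux, if_neg hc]
      rw [hshift, if_neg hc, hRef]
      exact ⟨by simpa using ih1, ih2, ih3⟩

theorem pvAdvance_le (stops : List Int) (p : Int) (j : Nat) (hj : j ≤ stops.length) :
    pvAdvance stops p j ≤ stops.length := by
  fun_induction pvAdvance stops p j with
  | case1 j h hlt ih => exact ih (by omega)
  | case2 j h hlt => omega
  | case3 j h => exact hj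

theorem pvAdvance_lt (stops : List Int) (p : Int) (j : Nat)
    (hinv : ∀ k (hk : k < j) (hkl : k < stops.length), stops[k] < p) :
    ∀ k (hk : k < pvAdvance stops p j) (hkl : k < stops.length), stops[k] < p := by
  fun_induction pvAdvance stops p j with
  | case1 j h hlt ih =>
    exact ih (fun k hk hkl => by
      rcases Nat.lt_or_ge k j with hlt2 | hge
      · exact hinv k hlt2 hkl
      · have : k = j := by omega
        subst this; exact hlt)
  | case2 j h hlt => intro k hk hkl; exact hinv k hk hkl
  | case3 j h => intro k hk hkl; exact hinv k hk hkl

theorem pvAdvance_stop (stops : List Int) (p : Int) (j : Nat)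
    (h : pvAdvance stops p j < stops.length) :
    p ≤ stops[pvAdvance stops p j] := by
  fun_induction pvAdvance stops p j with
  | case1 j hj hlt ih => exact ih h
  | case2 j hj hlt => omega
  | case3 j hj => omega

def pvStops (S : List Char) : List Int :=
  (PySem.List.pyRange 0 ((S.length : Int) - 2)).filter
      (fun q => PySem.List.slice S (some q) (some (q + 3)) = ['*','*','*'])

theorem pvStops_eq (S : List Char) :
    pvStops S = List.map (fun k : Nat => (k : Int))
      ((List.range (S.length - 2)).filter (fun k => decide (['*','*','*'] <+: S.drop k))) := by
  unfold pvStops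
  by_cases h2 : 2 ≤ S.length
  · have hc : (S.length : Int) - 2 = ((S.length - 2 : Nat) : Int) := by omega
    rw [hc, PySem.List.pyRange_zero_natCast, List.filter_map]
    refine congrArg _ (List.filter_congr ?_)
    intro k hk
    rw [List.mem_range] at hk
    have h3 : ((k : Int) + 3) = ((k + 3 : Nat) : Int) := by push_cast; ring
    simp only [Function.comp_apply, h3, PySem.List.slice_natCast]
    have : k + 3 - k = 3 := by omega
    rw [this]
    exact decide_eq_decide.mpr
      ⟨fun hh => List.prefix_iff_eq_take.mpr hh.symm, fun hh => (List.prefix_iff_eq_take.mp hh).symm⟩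
  · have hnil : PySem.List.pyRange 0 ((S.length : Int) - 2) = [] := by
      apply List.eq_nil_iff_forall_not_mem.mpr
      intro x hx
      rw [PySem.List.mem_pyRange_one] at hx
      omega
    have hnil2 : S.length - 2 = 0 := by omega
    simp [hnil, hnil2]

theorem pvStops_sorted (S : List Char) : (pvStops S).Pairwise (· < ·) := by
  rw [pvStops_eq]
  refine List.pairwise_map.mpr ?_
  refine List.Pairwise.imp ?_ (List.Pairwise.filter _ (List.pairwise_lt_range))
  intro a b hab
  exact_mod_cast hab

theorem pvStops_mem (S : List Char) (q : Int) :
    q ∈ pvStops S ↔ ∃ k : Nat, q = (k : Int) ∧ ['*','*','*'] <+: S.drop k := by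
  rw [pvStops_eq]
  constructor
  · intro hq
    obtain ⟨k, hk, hqk⟩ := List.mem_map.mp hq
    obtain ⟨hkr, hpre⟩ := List.mem_filter.mp hk
    exact ⟨k, hqk.symm, of_decide_eq_true hpre⟩
  · rintro ⟨k, hqk, hpre⟩
    apply List.mem_map.mpr
    refine ⟨k, List.mem_filter.mpr ⟨?_, decide_eq_true hpre⟩, hqk.symm⟩
    rw [List.mem_range]
    have := hpre.length_le
    simp at this
    omega

theorem pv_first_stop_pos (S : List Char) (p : Nat) (j : Nat)
    (hj : j ≤ (pvStops S).length)
    (hinv : ∀ k (hk : k < j) (hkl : k < (pvStops S).length), (pvStops S)[k] < (p : Int))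
    (hd : 0 ≤ PySem.Chars.find (S.drop p) ['*','*','*']) :
    ∃ (hlt : pvAdvance (pvStops S) (p : Int) j < (pvStops S).length),
      (pvStops S)[pvAdvance (pvStops S) (p : Int) j] =
        ((p + (PySem.Chars.find (S.drop p) ['*','*','*']).toNat : Nat) : Int) := by
  set stops := pvStops S with hstdef
  set d := PySem.Chars.find (S.drop p) ['*','*','*'] with hddef
  set j' := pvAdvance stops (p : Int) j with hjdef
  have hspec := PySem.Chars.find_spec (s := S.drop p) (sub := ['*','*','*']) hd
  have hpre : ['*','*','*'] <+: S.drop (p + d.toNat) := by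
    have := hspec.1
    rw [List.drop_drop] at this
    exact this
  have hmem : ((p + d.toNat : Nat) : Int) ∈ stops := (pvStops_mem S _).mpr ⟨p + d.toNat, rfl, hpre⟩
  obtain ⟨m, hm, hqm⟩ := List.mem_iff_getElem.mp hmem
  have hpost := pvAdvance_lt stops (p : Int) j hinv
  have hj'm : j' ≤ m := by
    by_contra hcon
    have := hpost m (by omega) hm
    rw [hqm] at this
    omega
  have hlt : j' < stops.length := by omega
  refine ⟨hlt, ?_⟩
  have hge : (p : Int) ≤ stops[j'] := pvAdvance_stop stops (p : Int) j hlt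
  obtain ⟨k, hk, hkpre⟩ := (pvStops_mem S _).mp (List.getElem_mem hlt)
  have hpk : p ≤ k := by
    rw [hk] at hge
    exact_mod_cast hge
  have hkge : p + d.toNat ≤ k := by
    by_contra hcon
    have hik : ['*','*','*'] <+: (S.drop p).drop (k - p) := by
      rw [List.drop_drop, show p + (k - p) = k from by omega]
      exact hkpre
    exact absurd hik (hspec.2 (k - p) (by omega))
  have hle : stops[j'] ≤ ((p + d.toNat : Nat) : Int) := by
    rcases Nat.eq_or_lt_of_le hj'm with he | hlt2
    · have hidx : stops[j']'hlt = stops[m]'hm := by congr 1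
      rw [hidx, hqm]
    · have := (List.pairwise_iff_getElem.mp (pvStops_sorted S)) j' m hlt hm hlt2
      have h2 : stops[j']'hlt < stops[m]'hm := this
      rw [hqm] at h2
      omega
  rw [hk] at hle ⊢
  have : k ≤ p + d.toNat := by exact_mod_cast hle
  congr
  omega

theorem pv_first_stop_neg (S : List Char) (p : Nat) (j : Nat)
    (hj : j ≤ (pvStops S).length)
    (hd : PySem.Chars.find (S.drop p) ['*','*','*'] = -1) :
    ¬ pvAdvance (pvStops S) (p : Int) j < (pvStops S).length := by
  intro hlt
  have hge : (p : Int) ≤ (pvStops S)[pvAdvance (pvStops S) (p : Int) j] :=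
    pvAdvance_stop (pvStops S) (p : Int) j hlt
  obtain ⟨k, hk, hkpre⟩ := (pvStops_mem S _).mp (List.getElem_mem hlt)
  have hpk : p ≤ k := by
    rw [hk] at hge
    exact_mod_cast hge
  have hinf : ['*','*','*'] <:+: S.drop p := by
    rw [← PySem.Chars.isIn_iff_infix, ← PySem.Chars.exists_prefix_drop_iff_isIn]
    refine ⟨k - p, ?_⟩
    rw [List.drop_drop, show p + (k - p) = k from by omega]
    exact hkpre
  rw [PySem.Chars.find_eq_neg_one_iff] at hd
  exact hd hinf

theorem pvB_fold (S : List Char) (rest : List String) (total : Int) (orfs : List String)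
    (p : Nat) (j : Nat)
    (h : S.drop p = (rest.map String.toList).flatten)
    (hj : j ≤ (pvStops S).length)
    (hinv : ∀ k (hk : k < j) (hkl : k < (pvStops S).length), (pvStops S)[k] < (p : Int)) :
    (rest.foldl (pvBStep S (pvStops S)) (total, orfs, (p : Int), j)).1
      = total + (pvRefAuxB S rest p).1
    ∧ (rest.foldl (pvBStep S (pvStops S)) (total, orfs, (p : Int), j)).2.1
      = orfs ++ (pvRefAuxB S rest p).2 := by
  induction rest generalizing total orfs p j with
  | nil => simp [pvRefAuxB]
  | cons a rest ih =>
    have h' : S.drop (p + a.toList.length) = (rest.map String.toList).flatten := by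
      rw [← List.drop_drop, h]
      simp
    have hlenp : ((p : Int) + (PySem.Str.len a : Int)) = ((p + a.toList.length : Nat) : Int) := by
      simp [PySem.Str.len_eq, PySem.Chars.len_eq]
    have hd := PySem.Chars.neg_one_le_find (S.drop p) ['*','*','*']
    set d := PySem.Chars.find (S.drop p) ['*','*','*'] with hddef
    by_cases hc : a = "Met" ∨ a = "MET"
    · set j1 := pvAdvance (pvStops S) (p : Int) j with hj1def
      have hj1le : j1 ≤ (pvStops S).length := pvAdvance_le _ _ _ hj
      have hinv1 : ∀ k (hk : k < j1) (hkl : k < (pvStops S).length),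
          (pvStops S)[k] < ((p + a.toList.length : Nat) : Int) := by
        intro k hk hkl
        have := pvAdvance_lt (pvStops S) (p : Int) j hinv k hk hkl
        have hle : ((p : Nat) : Int) ≤ ((p + a.toList.length : Nat) : Int) := by push_cast; omega
        omega
      by_cases hd0 : 0 ≤ d
      · obtain ⟨hlt, hq⟩ := pv_first_stop_pos S p j hj hinv hd0
        have hlt1 : j1 < (pvStops S).length := hlt
        have hx : PySem.List.slice S (some (p : Int)) (some ((pvStops S)[j1]'hlt1 + 3))
            = (S.drop p).take (d + 3).toNat := by
          rw [show (pvStops S)[j1]'hlt1 = ((p + d.toNat : Nat) : Int) from hq,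
            show ((p + d.toNat : Nat) : Int) + 3 = ((p + d.toNat + 3 : Nat) : Int) by push_cast; ring,
            PySem.List.slice_natCast]
          congr 1
          omega
        have hstep : pvBStep S (pvStops S) (total, orfs, (p : Int), j) a
            = ((if ((S.drop p).take (d + 3).toNat).count 'M' = 1 then total + 1 else total),
               orfs ++ [String.ofList ((S.drop p).take (d + 3).toNat)],
               ((p + a.toList.length : Nat) : Int), j1) := by
          unfold pvBStep
          simp only [if_pos hc, ← hj1def, dif_pos hlt1, hx, hlenp, pv_count_single]
        rw [List.foldl_cons, hstep]
        obtain ⟨ihc, ihl⟩ := ih (if ((S.drop p).take (d + 3).toNat).count 'M' = 1 then total + 1 else total)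
          (orfs ++ [String.ofList ((S.drop p).take (d + 3).toNat)]) (p + a.toList.length) j1 h' hj1le hinv1
        rw [ihc, ihl]
        have href : pvRefAuxB S (a :: rest) p =
            ((if ((S.drop p).take (d + 3).toNat).count 'M' = 1 then 1 else 0)
              + (pvRefAuxB S rest (p + a.toList.length)).1,
              String.ofList ((S.drop p).take (d + 3).toNat) :: (pvRefAuxB S rest (p + a.toList.length)).2) := by
          simp only [pvRefAuxB, if_pos hc, ← hddef, if_pos hd0]
        rw [href]
        constructor
        · by_cases hcc : ((S.drop p).take (d + 3).toNat).count 'M' = 1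
          · simp only [if_pos hcc]; ring
          · simp only [if_neg hcc]; ring
        · simp
      · have hdm : d = -1 := by omega
        have hnlt := pv_first_stop_neg S p j hj hdm
        have hnlt1 : ¬ j1 < (pvStops S).length := hnlt
        have hstep : pvBStep S (pvStops S) (total, orfs, (p : Int), j) a
            = (total, orfs, ((p + a.toList.length : Nat) : Int), j1) := by
          unfold pvBStep
          simp only [if_pos hc, ← hj1def, dif_neg hnlt1, hlenp]
        rw [List.foldl_cons, hstep]
        obtain ⟨ihc, ihl⟩ := ih total orfs (p + a.toList.length) j1 h' hj1le hinv1
        rw [ihc, ihl]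
        have href : pvRefAuxB S (a :: rest) p = pvRefAuxB S rest (p + a.toList.length) := by
          simp only [pvRefAuxB, if_pos hc, ← hddef, if_neg hd0]
        rw [href]
        exact ⟨rfl, rfl⟩
    · have hstep : pvBStep S (pvStops S) (total, orfs, (p : Int), j) a
          = (total, orfs, ((p + a.toList.length : Nat) : Int), j) := by
        unfold pvBStep
        simp only [if_neg hc, hlenp]
      rw [List.foldl_cons, hstep]
      have hinv' : ∀ k (hk : k < j) (hkl : k < (pvStops S).length),
          (pvStops S)[k] < ((p + a.toList.length : Nat) : Int) := by
        intro k hk hkl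
        have := hinv k hk hkl
        have hle : ((p : Nat) : Int) ≤ ((p + a.toList.length : Nat) : Int) := by push_cast; omega
        omega
      obtain ⟨ihc, ihl⟩ := ih total orfs (p + a.toList.length) j h' hj hinv'
      rw [ihc, ihl]
      have href : pvRefAuxB S (a :: rest) p = pvRefAuxB S rest (p + a.toList.length) := by
        simp only [pvRefAuxB, if_neg hc]
      rw [href]
      exact ⟨rfl, rfl⟩

-- B's result as the two references, for any frame
theorem pvA_closed (frame : List String) :
    ORFcounter frame = pvRefAux ((frame.map String.toList).flatten) frame 0 := by
  set S := (frame.map String.toList).flatten with hSdef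
  have h0 : S.drop 0 = (frame.map String.toList).flatten := by rw [List.drop_zero]
  obtain ⟨hA1, hA2, hA3⟩ := pv_refA frame 0 S h0
  have hframe1 : pvOframe frame = (pvRefAux S frame 0).2 := by
    rw [pvOframe_closed]
    exact hA1
  show (pvOuter (pvOframe frame) 0, pvOframe frame) = _
  rw [hframe1, pv_outer_eq _ _ hA3, ← hA2]
  simp

theorem pvB_closed (frame : List String) :
    ORFcounter_alt frame = pvRefAuxB ((frame.map String.toList).flatten) frame 0 := by
  set S := (frame.map String.toList).flatten with hSdef
  have h0 : S.drop 0 = (frame.map String.toList).flatten := by rw [List.drop_zero]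
  unfold ORFcounter_alt
  simp only [pv_join_eq_flatten, ← hSdef]
  have hstops : ((PySem.List.pyRange 0 ((S.length : Int) - 2)).filter
      (fun q => decide (PySem.List.slice S (some q) (some (q + 3)) = ['*','*','*']))) = pvStops S := rfl
  rw [hstops]
  obtain ⟨hb1, hb2⟩ := pvB_fold S frame 0 [] 0 0 h0 (Nat.zero_le _)
    (fun k hk _ => absurd hk (Nat.not_lt_zero k))
  simp only [Nat.cast_zero] at hb1 hb2
  rw [hb1, hb2]
  simp

-- outside D_: every Met has a downstream stop, so the two references coincide
theorem pv_ref_eq (S : List Char) (rest : List String) (p : Nat)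
    (h : S.drop p = (rest.map String.toList).flatten)
    (H : ∀ i, i < rest.length → (rest.getD i "" = "Met" ∨ rest.getD i "" = "MET") →
         PySem.Chars.isIn ['*','*','*'] (((rest.drop i).map String.toList).flatten) = true) :
    pvRefAuxB S rest p = pvRefAux S rest p := by
  induction rest generalizing p with
  | nil => rfl
  | cons a rest ih =>
    have h' : S.drop (p + a.toList.length) = (rest.map String.toList).flatten := by
      rw [← List.drop_drop, h]
      simp
    have H' : ∀ i, i < rest.length → (rest.getD i "" = "Met" ∨ rest.getD i "" = "MET") →
        PySem.Chars.isIn ['*','*','*'] (((rest.drop i).map String.toList).flatten) = true := by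
      intro i hi hm
      have := H (i + 1) (by simpa using Nat.succ_lt_succ hi) (by simpa using hm)
      simpa using this
    have hrec := ih (p + a.toList.length) h' H'
    by_cases hc : a = "Met" ∨ a = "MET"
    · have hin : PySem.Chars.isIn ['*','*','*'] (S.drop p) = true := by
        have := H 0 (by simp) (by simpa using hc)
        rw [h]
        simpa using this
      have hd0 : 0 ≤ PySem.Chars.find (S.drop p) ['*','*','*'] := by
        have hinf := (PySem.Chars.isIn_iff_infix ['*','*','*'] (S.drop p)).mp hin
        have hne : PySem.Chars.find (S.drop p) ['*','*','*'] ≠ -1 := by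
          intro he
          rw [PySem.Chars.find_eq_neg_one_iff] at he
          exact he hinf
        have := PySem.Chars.neg_one_le_find (S.drop p) ['*','*','*']
        omega
      simp only [pvRefAux, pvRefAuxB, if_pos hc, if_pos hd0, hrec]
      by_cases hcc : ((S.drop p).take (PySem.Chars.find (S.drop p) ['*','*','*'] + 3).toNat).count 'M' = 1
      · simp [hcc, hd0]
      · simp [hcc]
    · simp only [pvRefAux, pvRefAuxB, if_neg hc, hrec]

-- inside D_: B's orf list is strictly shorter than A's
theorem pv_len_le (S : List Char) (rest : List String) (p : Nat) :
    (pvRefAuxB S rest p).2.length ≤ (pvRefAux S rest p).2.length := by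
  induction rest generalizing p with
  | nil => simp [pvRefAux, pvRefAuxB]
  | cons a rest ih =>
    have hrec := ih (p + a.toList.length)
    by_cases hc : a = "Met" ∨ a = "MET"
    · by_cases hd0 : 0 ≤ PySem.Chars.find (S.drop p) ['*','*','*']
      · simp only [pvRefAux, pvRefAuxB, if_pos hc, if_pos hd0, List.length_cons]
        omega
      · simp only [pvRefAux, pvRefAuxB, if_pos hc, if_neg hd0, List.length_cons]
        omega
    · simp only [pvRefAux, pvRefAuxB, if_neg hc]
      exact hrec

theorem pv_len_lt (S : List Char) (rest : List String) (p : Nat)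
    (h : S.drop p = (rest.map String.toList).flatten)
    (H : ∃ i, i < rest.length ∧ (rest.getD i "" = "Met" ∨ rest.getD i "" = "MET") ∧
         PySem.Chars.isIn ['*','*','*'] (((rest.drop i).map String.toList).flatten) = false) :
    (pvRefAuxB S rest p).2.length < (pvRefAux S rest p).2.length := by
  induction rest generalizing p with
  | nil => obtain ⟨i, hi, _⟩ := H; simp at hi
  | cons a rest ih =>
    have h' : S.drop (p + a.toList.length) = (rest.map String.toList).flatten := by
      rw [← List.drop_drop, h]
      simp
    obtain ⟨i, hi, hm, hno⟩ := H
    cases i with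
    | zero =>
      have hc : a = "Met" ∨ a = "MET" := by simpa using hm
      have hnoS : PySem.Chars.isIn ['*','*','*'] (S.drop p) = false := by
        rw [h]
        simpa using hno
      have hdm : PySem.Chars.find (S.drop p) ['*','*','*'] = -1 := by
        rw [PySem.Chars.find_eq_neg_one_iff]
        intro hinf
        have := (PySem.Chars.isIn_iff_infix ['*','*','*'] (S.drop p)).mpr hinf
        rw [hnoS] at this
        exact Bool.false_ne_true this
      have hd0 : ¬ (0 ≤ PySem.Chars.find (S.drop p) ['*','*','*']) := by omega
      simp only [pvRefAux, pvRefAuxB, if_pos hc, if_neg hd0, List.length_cons]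
      have := pv_len_le S rest (p + a.toList.length)
      omega
    | succ i =>
      have H' : ∃ i', i' < rest.length ∧ (rest.getD i' "" = "Met" ∨ rest.getD i' "" = "MET") ∧
          PySem.Chars.isIn ['*','*','*'] (((rest.drop i').map String.toList).flatten) = false :=
        ⟨i, by simpa using hi, by simpa using hm, by simpa using hno⟩
      have hrec := ih (p + a.toList.length) h' H'
      by_cases hc : a = "Met" ∨ a = "MET"
      · by_cases hd0 : 0 ≤ PySem.Chars.find (S.drop p) ['*','*','*']
        · simp only [pvRefAux, pvRefAuxB, if_pos hc, if_pos hd0, List.length_cons]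
          omega
        · simp only [pvRefAux, pvRefAuxB, if_pos hc, if_neg hd0, List.length_cons]
          omega
      · simp only [pvRefAux, pvRefAuxB, if_neg hc]
        exact hrec

-- ===== VERDICT (by name: the statements are the Claim_ definitions above) =====
theorem ORFcounter_spec : Claim_unchanged_ORFcounter := by
  intro frame _
  intro hnd
  have H : ∀ i, i < frame.length → (frame.getD i "" = "Met" ∨ frame.getD i "" = "MET") →
      PySem.Chars.isIn ['*','*','*'] (((frame.drop i).map String.toList).flatten) = true := by
    intro i hi hm
    by_contra hno
    apply hnd
    unfold D_ORFcounter
    rw [List.any_eq_true]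
    refine ⟨i, List.mem_range.mpr hi, ?_⟩
    have hmb : (decide (frame.getD i "" = "Met") || decide (frame.getD i "" = "MET")) = true := by
      rcases hm with h | h <;> rw [h] <;> simp
    have hfalse : PySem.Chars.isIn ['*','*','*'] (((frame.drop i).map String.toList).flatten) = false :=
      Bool.eq_false_iff.mpr hno
    show ((decide (frame.getD i "" = "Met") || decide (frame.getD i "" = "MET"))
        && !(PySem.Chars.isIn ['*','*','*'] (((frame.drop i).map String.toList).flatten))) = true
    rw [hmb, hfalse]
    rfl
  rw [pvA_closed, pvB_closed]
  exact (pv_ref_eq _ frame 0 (by rw [List.drop_zero]) H).symm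

theorem ORFcounter_changed : Claim_changed_ORFcounter := by
  unfold Claim_changed_ORFcounter
  decide

theorem ORFcounter_tight : Claim_exact_ORFcounter := by
  intro frame _ hd
  unfold D_ORFcounter at hd
  rw [List.any_eq_true] at hd
  obtain ⟨i, hir, hb⟩ := hd
  rw [List.mem_range] at hir
  rw [Bool.and_eq_true] at hb
  obtain ⟨hor, hnotb⟩ := hb
  rw [Bool.or_eq_true] at hor
  have hm : frame.getD i "" = "Met" ∨ frame.getD i "" = "MET" := by
    rcases hor with h | h
    · exact Or.inl (of_decide_eq_true h)
    · exact Or.inr (of_decide_eq_true h)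
  have hiso : PySem.Chars.isIn ['*','*','*'] (((frame.drop i).map String.toList).flatten) = false := by
    rw [Bool.not_eq_true'] at hnotb
    exact hnotb
  have hlen := pv_len_lt ((frame.map String.toList).flatten) frame 0 (by rw [List.drop_zero])
    ⟨i, hir, hm, hiso⟩
  intro heq
  rw [pvA_closed, pvB_closed] at heq
  have hlens := congrArg (fun z : Int × List String => z.2.length) heq
  simp only at hlens
  omega
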